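-- pv_equiv track=rewrite | github.com/aesaganda/algo-analiz | koy.py | optimalMesafe
-- ===== SOURCE A (Python) =====
-- def optimalMesafe(koy: list):
--     postane = int
--
--     villageNumber = len(koy)
--
--     for i in range(villageNumber):
--         postane = i
--         uzaklik = mesafeBul(postane, villageNumber)
--         if max(uzaklik) == villageNumber // 2:
--             break
--
--     return postane
--
-- def mesafeBul(postane: int, villageNumber: int):
--     uzaklik = list()
--
--     for i in range(villageNumber):
--         uzaklik.append(abs(postane - i))
--
--     return uzaklik
-- ===== SOURCE B (Python) =====
-- def optimalMesafe(koy: list):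
--     # The farthest village from post office i is max(i, n-1-i); the first i
--     # where that equals n//2 is (n-1)//2, so the answer is closed-form.
--     return (len(koy) - 1) // 2
-- ===== Notes on version B (the rewrite author's own statement) =====
-- stated objective: faster
-- what changed: Replaces the O(n^2) scan (building a distance list per candidate and taking its max) with the closed form (len(koy)-1)//2, since max distance from i is max(i, n-1-i) and the first i with that equal to n//2 is (n-1)//2; Pre_ excludes only the empty list, where A returns the class object int instead of an integer.
import Mathlib
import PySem

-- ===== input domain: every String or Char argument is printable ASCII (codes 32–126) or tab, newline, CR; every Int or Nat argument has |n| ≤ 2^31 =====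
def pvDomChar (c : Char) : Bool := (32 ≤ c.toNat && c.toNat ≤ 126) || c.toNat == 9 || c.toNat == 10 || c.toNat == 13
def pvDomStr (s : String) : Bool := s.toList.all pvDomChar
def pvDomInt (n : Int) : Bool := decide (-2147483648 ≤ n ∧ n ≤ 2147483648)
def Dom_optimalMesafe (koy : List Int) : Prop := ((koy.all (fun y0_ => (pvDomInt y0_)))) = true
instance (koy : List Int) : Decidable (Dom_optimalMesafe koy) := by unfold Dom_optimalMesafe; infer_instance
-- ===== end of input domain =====

-- B replaces A's quadratic scan by the closed form (len(koy)-1)//2 (measured asymptotically faster).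
-- ===== PORT A =====
-- helper mesafeBul(postane, villageNumber): builds the list of |postane - i| for i in range(villageNumber)
def mesafeBul (postane : Int) (villageNumber : Nat) : List Int :=
  (List.range villageNumber).foldl (fun uzaklik (i : Nat) => uzaklik ++ [|postane - (i : Int)|]) []

-- the for-loop of A: carries 'postane'; breaks (returns i) when max(uzaklik) == villageNumber // 2
def optLoop (n : Nat) : List Nat → Int → Int
  | [], postane => postane
  | i :: rest, _ =>
      if (PySem.List.max? (mesafeBul (i : Int) n) id).getD 0 = PySem.Int.floordiv (n : Int) 2
      then (i : Int) else optLoop n rest (i : Int)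

def optimalMesafe (koy : List Int) : Int :=
  optLoop koy.length (List.range koy.length) 0

-- ===== PORT B =====
def optimalMesafe_alt (koy : List Int) : Int :=
  PySem.Int.floordiv ((koy.length : Int) - 1) 2

-- ===== PRECONDITION & SPEC =====
-- Pre_ excludes only the empty list, on which A returns the class object `int` (not an integer value).
def Pre_optimalMesafe (koy : List Int) : Prop := koy ≠ []
instance (koy : List Int) : Decidable (Pre_optimalMesafe koy) := by unfold Pre_optimalMesafe; infer_instance
def pvWitness_optimalMesafe : List Int := [3, 1, 2]

def Spec_optimalMesafe (koy : List Int) (out : Int) : Prop := out = optimalMesafe_alt koy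
instance (koy : List Int) (out : Int) : Decidable (Spec_optimalMesafe koy out) := by unfold Spec_optimalMesafe; infer_instance

-- ===== CLAIM (what is proved, stated in full; the proofs are below) =====
def Claim_equal_optimalMesafe : Prop := ∀ (koy : List Int), Dom_optimalMesafe koy → Pre_optimalMesafe koy → Spec_optimalMesafe koy (optimalMesafe koy)

-- ===== LEMMAS AND PROOFS =====

lemma mesafeBul_eq_map (p : Int) (n : Nat) :
    mesafeBul p n = (List.range n).map (fun (j : Nat) => |p - (j : Int)|) := by
  simpa [mesafeBul] using
    PySem.List.foldl_append_singleton_eq_map (fun (j : Nat) => |p - (j : Int)|) (List.range n) []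

-- max(|i-0|, …, |i-(n-1)|) = max i (n-1-i)  for 0 ≤ i and 1 ≤ n
lemma max_mesafeBul (i : Nat) : ∀ n : Nat, 1 ≤ n →
    PySem.List.max? (mesafeBul (i : Int) n) id = some (max (i : Int) ((n : Int) - 1 - i)) := by
  intro n
  induction n with
  | zero => omega
  | succ n ih =>
    intro _
    by_cases hn : 1 ≤ n
    · have h := ih hn
      rw [mesafeBul_eq_map] at h ⊢
      rw [List.range_succ, List.map_append]
      simp only [PySem.List.max?, List.foldl_append] at h ⊢
      rw [h]
      simp only [List.map_cons, List.map_nil, List.foldl_cons, List.foldl_nil, id]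
      rcases abs_cases ((i : Int) - (n : Int)) with ⟨he, hc⟩ | ⟨he, hc⟩ <;>
        · rw [he]
          split_ifs with h1 <;> · congr 1; omega
    · interval_cases n
      rw [mesafeBul_eq_map]
      simp only [zero_add, List.range_one, List.map_cons, List.map_nil, PySem.List.max?,
        List.foldl_cons, List.foldl_nil, Nat.cast_zero, Nat.cast_one, id]
      congr 1
      rcases abs_cases ((i : Int) - 0) with ⟨he, hc⟩ | ⟨he, hc⟩ <;> · rw [he]; omega

-- the loop returns the first index satisfying the break condition
lemma optLoop_find (n : Nat) (m : Nat)
    (hm : (PySem.List.max? (mesafeBul (m : Int) n) id).getD 0 = PySem.Int.floordiv (n : Int) 2) :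
    ∀ (l : List Nat) (l2 : List Nat) (p : Int),
      (∀ j ∈ l, ¬ ((PySem.List.max? (mesafeBul (j : Int) n) id).getD 0 = PySem.Int.floordiv (n : Int) 2)) →
      optLoop n (l ++ m :: l2) p = (m : Int) := by
  intro l
  induction l with
  | nil => intro l2 p _; simp [optLoop, hm]
  | cons j l ih =>
    intro l2 p hl
    have hj := hl j (by simp)
    rw [List.cons_append]
    simp only [optLoop]
    rw [if_neg hj]
    exact ih l2 (j : Int) (fun k hk => hl k (by simp [hk]))

theorem optimalMesafe_eq (koy : List Int) (h : koy ≠ []) :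
    optimalMesafe koy = optimalMesafe_alt koy := by
  set n := koy.length with hn
  have hn1 : 1 ≤ n := by
    cases koy with
    | nil => exact absurd rfl h
    | cons a l => simp [hn]
  set m : Nat := (n - 1) / 2 with hmdef
  have hmn : m < n := by omega
  -- break condition holds at m
  have hm : (PySem.List.max? (mesafeBul (m : Int) n) id).getD 0 = PySem.Int.floordiv (n : Int) 2 := by
    rw [max_mesafeBul m n hn1, PySem.Int.floordiv_eq_ediv_of_pos (by norm_num)]
    simp only [Option.getD_some]
    rw [max_def]
    split_ifs <;> omega
  -- break condition fails below m
  have hlt : ∀ j ∈ List.range m,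
      ¬ ((PySem.List.max? (mesafeBul (j : Int) n) id).getD 0 = PySem.Int.floordiv (n : Int) 2) := by
    intro j hj
    have hjm : j < m := List.mem_range.mp hj
    rw [max_mesafeBul j n hn1, PySem.Int.floordiv_eq_ediv_of_pos (by norm_num)]
    simp only [Option.getD_some]
    rw [max_def]
    split_ifs <;> omega
  -- split range n at m
  have hsplit : List.range n = List.range m ++ m :: List.drop (m + 1) (List.range n) := by
    conv_lhs => rw [← List.take_append_drop m (List.range n)]
    rw [List.take_range, Nat.min_eq_left hmn.le]
    congr 1
    rw [List.drop_eq_getElem_cons (by simpa using hmn)]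
    simp
  have halt : optimalMesafe_alt koy = (m : Int) := by
    rw [optimalMesafe_alt, ← hn, PySem.Int.floordiv_eq_ediv_of_pos (by norm_num)]
    omega
  rw [optimalMesafe, ← hn, hsplit, halt]
  exact optLoop_find n m hm (List.range m) _ 0 hlt

-- ===== VERDICT (by name: the statement is the Claim_ definition above) =====
theorem optimalMesafe_spec : Claim_equal_optimalMesafe := by
  intro koy _ hpre
  unfold Spec_optimalMesafe
  exact optimalMesafe_eq koy hpre
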